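-- pv_equiv track=rewrite | github.com/mehuloo3/TaskOdoo | AssesmentPy/10. Solve in Fewest Steps.py | Fewest
-- ===== SOURCE A (Python) =====
-- def Fewest(A):
--     digits=""
--     st=""
--     for i in A:
--        #if digit
--       if i.isdigit():
--          digits+=i
--       else:
--        # if string
--          st+=i
--     #both sort
--     d=sorted(digits)
--     e=sorted(st)
--     # temporory var
--     x=""
--     for i in e:
--        x+=i
--     for i in d:
--        x+=i
--     return x
-- ===== SOURCE B (Python) =====
-- def Fewest(A):
--     # counting sort over the 128-code ASCII alphabet: one counting pass,
--     # then emit non-digit codes in order followed by digit codes in order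
--     cnt = {}
--     for ch in A:
--         cnt[ch] = cnt.get(ch, 0) + 1
--     letters = []
--     digits = []
--     for code in range(128):
--         ch = chr(code)
--         block = ch * cnt.get(ch, 0)
--         if ch.isdigit():
--             digits.append(block)
--         else:
--             letters.append(block)
--     return ''.join(letters) + ''.join(digits)
-- ===== Notes on version B (the rewrite author's own statement) =====
-- stated objective: faster
-- what changed: Replaces the two comparison sorts (sorted on the digit and non-digit partitions) by a counting sort: one counting pass over the string, then the output is emitted by scanning the 128 ASCII codes in order, non-digit codes first, digit codes last.
import Mathlib
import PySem

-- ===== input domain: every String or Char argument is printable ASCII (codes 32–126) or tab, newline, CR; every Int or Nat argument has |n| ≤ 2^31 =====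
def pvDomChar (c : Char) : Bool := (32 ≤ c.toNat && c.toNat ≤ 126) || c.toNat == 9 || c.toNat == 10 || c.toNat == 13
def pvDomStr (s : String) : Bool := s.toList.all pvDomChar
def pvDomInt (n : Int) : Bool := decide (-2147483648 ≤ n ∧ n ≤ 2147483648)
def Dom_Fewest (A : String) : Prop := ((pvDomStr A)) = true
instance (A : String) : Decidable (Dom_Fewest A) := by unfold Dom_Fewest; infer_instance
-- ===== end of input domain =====

-- B replaces A's two comparison sorts by a single counting pass plus a scan of the
-- 128 ASCII codes (counting sort); same output, asymptotically faster.

-- ===== PORT A =====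
-- one loop splitting the string into digits and the rest, sort both, concatenate rest ++ digits
def Fewest (A : String) : String :=
  let p := A.toList.foldl
    (fun (p : List Char × List Char) i =>
      if PySem.Chars.isdigit i then (p.1 ++ [i], p.2) else (p.1, p.2 ++ [i]))
    (([], []) : List Char × List Char)
  let d := PySem.List.sorted p.1 (fun x => x) false
  let e := PySem.List.sorted p.2 (fun x => x) false
  let x := e.foldl (fun acc i => acc ++ [i]) ([] : List Char)
  let x := d.foldl (fun acc i => acc ++ [i]) x
  String.ofList x

-- ===== PORT B =====
-- counting sort: count each character once, then emit codes 0..127 in order,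
-- non-digit blocks collected first, digit blocks last
def Fewest_alt (A : String) : String :=
  let cnt := A.toList.foldl
    (fun (d : PySem.Dict Char Int) ch => d.insert ch (d.getD ch 0 + 1)) PySem.Dict.empty
  let p := (List.range 128).foldl
    (fun (p : List Char × List Char) code =>
      let ch := Char.ofNat code
      let block := List.replicate (cnt.getD ch 0).toNat ch
      if PySem.Chars.isdigit ch then (p.1, p.2 ++ block) else (p.1 ++ block, p.2))
    (([], []) : List Char × List Char)
  String.ofList (p.1 ++ p.2)

-- ===== PRECONDITION & SPEC =====
def Spec_Fewest (A : String) (out : String) : Prop := out = Fewest_alt A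
instance (A : String) (out : String) : Decidable (Spec_Fewest A out) := by unfold Spec_Fewest; infer_instance

-- ===== CLAIM (what is proved, stated in full; the proofs are below) =====
def Claim_equal_Fewest : Prop := ∀ (A : String), Dom_Fewest A → Spec_Fewest A (Fewest A)

-- ===== LEMMAS AND PROOFS =====

-- the block of code c: k c copies of the character with code c, kept when q holds
def pvBlocks (k : Char → Nat) (q : Char → Bool) (n : Nat) : List Char :=
  (List.range n).flatMap
    (fun c => if q (Char.ofNat c) then List.replicate (k (Char.ofNat c)) (Char.ofNat c) else [])

theorem pvBlocks_succ (k : Char → Nat) (q : Char → Bool) (n : Nat) :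
    pvBlocks k q (n + 1) = pvBlocks k q n ++
      (if q (Char.ofNat n) then List.replicate (k (Char.ofNat n)) (Char.ofNat n) else []) := by
  simp [pvBlocks, List.range_succ]

theorem pvToNat_ofNat (n : Nat) (h : n < 128) : (Char.ofNat n).toNat = n := by
  have hv : n.isValidChar := Or.inl (by omega)
  simp [Char.ofNat, Char.ofNatAux, hv, Char.toNat]

-- A's partition loop
theorem pvPart (l : List Char) (a b : List Char) :
    l.foldl
      (fun (p : List Char × List Char) i =>
        if PySem.Chars.isdigit i then (p.1 ++ [i], p.2) else (p.1, p.2 ++ [i])) (a, b)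
    = (a ++ l.filter PySem.Chars.isdigit, b ++ l.filter (fun i => !PySem.Chars.isdigit i)) := by
  induction l generalizing a b with
  | nil => simp
  | cons x xs ih =>
    by_cases hx : PySem.Chars.isdigit x <;> simp [hx, ih, List.filter_cons]

-- B's emission loop
theorem pvEmit (k : Char → Nat) (n : Nat) (a b : List Char) :
    (List.range n).foldl
      (fun (p : List Char × List Char) code =>
        if PySem.Chars.isdigit (Char.ofNat code)
        then (p.1, p.2 ++ List.replicate (k (Char.ofNat code)) (Char.ofNat code))
        else (p.1 ++ List.replicate (k (Char.ofNat code)) (Char.ofNat code), p.2)) (a, b)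
    = (a ++ pvBlocks k (fun c => !PySem.Chars.isdigit c) n, b ++ pvBlocks k PySem.Chars.isdigit n) := by
  induction n with
  | zero => simp [pvBlocks]
  | succ m ih =>
    rw [List.range_succ, List.foldl_append, ih]
    by_cases hd : PySem.Chars.isdigit (Char.ofNat m) <;>
      simp [pvBlocks_succ, hd]

theorem pvCount_blocks (xs : List Char) (q : Char → Bool) (n : Nat) (hn : n ≤ 128) (y : Char) :
    List.count y (pvBlocks (fun c => xs.count c) q n)
      = if y.toNat < n ∧ q y = true then xs.count y else 0 := by
  induction n with
  | zero => simp [pvBlocks]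
  | succ m ih =>
    have hm : m < 128 := by omega
    rw [pvBlocks_succ, List.count_append, ih (by omega)]
    by_cases hq : q (Char.ofNat m)
    · by_cases hy : Char.ofNat m = y
      · subst hy
        simp [pvToNat_ofNat m hm, hq, List.count_replicate]
      · have hne : y.toNat ≠ m := by
          intro h; exact hy (by rw [← h, Char.ofNat_toNat])
        have : List.count y (if q (Char.ofNat m) = true then
            List.replicate (xs.count (Char.ofNat m)) (Char.ofNat m) else []) = 0 := by
          simp [hq, List.count_replicate, hy]
        rw [this]
        by_cases hlt : y.toNat < m
        · simp [hlt, show y.toNat < m + 1 by omega]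
        · simp [hlt, show ¬ y.toNat < m + 1 by omega]
    · by_cases hy : Char.ofNat m = y
      · subst hy
        simp [pvToNat_ofNat m hm, hq]
      · have hne : y.toNat ≠ m := by
          intro h; exact hy (by rw [← h, Char.ofNat_toNat])
        by_cases hlt : y.toNat < m
        · simp [hq, hlt, show y.toNat < m + 1 by omega]
        · simp [hq, hlt, show ¬ y.toNat < m + 1 by omega]

theorem pvPerm_blocks (xs : List Char) (q : Char → Bool) (h : ∀ x ∈ xs, x.toNat < 128) :
    (pvBlocks (fun c => xs.count c) q 128).Perm (xs.filter q) := by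
  rw [List.perm_iff_count]
  intro y
  rw [pvCount_blocks xs q 128 le_rfl y]
  by_cases hy : y.toNat < 128
  · by_cases hq : q y
    · simp [hy, hq, List.count_filter hq]
    · have : y ∉ xs.filter q := by
        intro hmem
        exact hq (List.of_mem_filter hmem)
      simp [hq, List.count_eq_zero_of_not_mem this]
  · have : y ∉ xs.filter q := by
      intro hmem
      exact hy (h y (List.mem_filter.mp hmem).1)
    simp [hy, List.count_eq_zero_of_not_mem this]

theorem pvMem_blocks (k : Char → Nat) (q : Char → Bool) (n : Nat) (y : Char)
    (hy : y ∈ pvBlocks k q n) (hn : n ≤ 128) : y.toNat < n := by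
  induction n with
  | zero => simp [pvBlocks] at hy
  | succ m ih =>
    rw [pvBlocks_succ] at hy
    rcases List.mem_append.mp hy with h1 | h2
    · have := ih h1 (by omega); omega
    · by_cases hq : q (Char.ofNat m)
      · rw [if_pos hq] at h2
        have : y = Char.ofNat m := (List.eq_of_mem_replicate h2)
        rw [this, pvToNat_ofNat m (by omega)]
        omega
      · rw [if_neg hq] at h2
        simp at h2

theorem pvPairwise_blocks (k : Char → Nat) (q : Char → Bool) (n : Nat) (hn : n ≤ 128) :
    (pvBlocks k q n).Pairwise (fun x1 x2 => x1 ≤ x2) := by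
  induction n with
  | zero => simp [pvBlocks]
  | succ m ih =>
    rw [pvBlocks_succ]
    rw [List.pairwise_append]
    refine ⟨ih (by omega), ?_, ?_⟩
    · by_cases hq : q (Char.ofNat m) <;> simp [hq, List.pairwise_replicate]
    · intro a ha b hb
      have ha' : a.toNat < m := pvMem_blocks k q m a ha (by omega)
      have hb' : b.toNat = m := by
        by_cases hq : q (Char.ofNat m)
        · rw [if_pos hq] at hb
          rw [List.eq_of_mem_replicate hb, pvToNat_ofNat m (by omega)]
        · rw [if_neg hq] at hb
          simp at hb
      have hle : a.toNat ≤ b.toNat := by omega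
      exact Char.le_def.mpr (UInt32.le_iff_toNat_le.mpr hle)

theorem pvSorted_eq_blocks (xs : List Char) (q : Char → Bool) (h : ∀ x ∈ xs, x.toNat < 128) :
    PySem.List.sorted (xs.filter q) (fun x => x) false = pvBlocks (fun c => xs.count c) q 128 :=
  PySem.List.sorted_id_eq_of_perm_of_pairwise _ _
    (pvPerm_blocks xs q h) (pvPairwise_blocks _ q 128 le_rfl)

-- the counting pass counts
theorem pvCnt_getD (xs : List Char) (ch : Char) :
    ((xs.foldl (fun (d : PySem.Dict Char Int) ch => d.insert ch (d.getD ch 0 + 1))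
        PySem.Dict.empty).getD ch 0).toNat = xs.count ch := by
  rw [PySem.Dict.getD_foldl_insert_add_one]
  simp [PySem.Dict.empty, PySem.Dict.getD, PySem.Dict.get?]

-- ===== VERDICT (by name: the statement is the Claim_ definition above) =====
theorem Fewest_spec : Claim_equal_Fewest := by
  intro A hdom
  unfold Spec_Fewest Fewest Fewest_alt
  have h128 : ∀ x ∈ A.toList, x.toNat < 128 := by
    intro x hx
    have := List.all_eq_true.mp hdom x hx
    simp [pvDomChar] at this
    omega
  have hk : (fun ch => ((A.toList.foldl
      (fun (d : PySem.Dict Char Int) ch => d.insert ch (d.getD ch 0 + 1))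
      PySem.Dict.empty).getD ch 0).toNat) = fun ch => A.toList.count ch := by
    funext ch; exact pvCnt_getD A.toList ch
  rw [pvPart A.toList [] []]
  simp only [List.nil_append]
  rw [PySem.List.foldl_append_singleton, PySem.List.foldl_append_singleton,
      List.nil_append]
  rw [pvEmit (fun ch => ((A.toList.foldl
      (fun (d : PySem.Dict Char Int) ch => d.insert ch (d.getD ch 0 + 1))
      PySem.Dict.empty).getD ch 0).toNat) 128 [] []]
  simp only [List.nil_append]
  rw [hk]
  rw [pvSorted_eq_blocks A.toList PySem.Chars.isdigit h128,
      pvSorted_eq_blocks A.toList (fun i => !PySem.Chars.isdigit i) h128]
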